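-- pv_equiv track=rewrite | github.com/FPGAML/simty | auxiliary_scripts/cct_validation/gen_path_inputs.py | split_and_format
-- ===== SOURCE A (Python) =====
-- def split_and_format(p):
-- 	binstr = bin(int(p,16))
-- 	binstr = binstr[2:].zfill(43) # getting rid of the leading 0b
-- 	binp = []
-- 	binp.append(binstr[0]) # valid
-- 	binp.append(binstr[1:31]) # mpc
-- 	binp.append(binstr[31:35]) # vmask
-- 	binp.append(binstr[35:]) # calldepth
-- 	return( [hex(int(field,2))[2:] for field in binp] )
-- ===== SOURCE B (Python) =====
-- def split_and_format(p):
-- 	n = int(p, 16)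
-- 	valid = n >> 42
-- 	mpc = (n >> 12) & ((1 << 30) - 1)
-- 	vmask = (n >> 8) & 0xF
-- 	calldepth = n & 0xFF
-- 	return [format(f, 'x') for f in (valid, mpc, vmask, calldepth)]
-- ===== Notes on version B (the rewrite author's own statement) =====
-- stated objective: idiomatic
-- what changed: B parses the hex value once and extracts the four fields of the fixed 43-bit layout (1/30/4/8 bits) with constant shifts and masks, instead of A's building a zero-padded binary string and slicing/re-parsing substrings; Pre_ excludes values of 44 or more bits, which exceed the 43-bit packet format and on which neither reading (A lets calldepth absorb the extra bits from the left, B keeps the fixed layout) is specified.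
-- outside the precondition, e.g. on split_and_format('80000000000'): A returns ['1', '0', '0', '0'], B returns ['2', '0', '0', '0']
import Mathlib
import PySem

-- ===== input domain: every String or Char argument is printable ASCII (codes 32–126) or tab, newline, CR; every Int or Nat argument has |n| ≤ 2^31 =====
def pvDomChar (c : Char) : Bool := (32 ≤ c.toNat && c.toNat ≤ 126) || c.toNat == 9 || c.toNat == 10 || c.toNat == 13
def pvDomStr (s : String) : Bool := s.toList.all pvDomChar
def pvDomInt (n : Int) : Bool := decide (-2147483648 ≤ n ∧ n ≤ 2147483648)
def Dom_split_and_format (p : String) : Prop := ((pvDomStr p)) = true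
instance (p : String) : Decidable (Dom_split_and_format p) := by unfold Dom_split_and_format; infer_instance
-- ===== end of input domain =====

-- B replaces A's binary-string padding/slicing by fixed-layout shift/mask field extraction (alternative algorithm, no speed claim).

-- shared helpers: value of a string of binary digits, and lowercase hex rendering
def bitOf (c : Char) : Nat := if c = '1' then 1 else 0

def binVal (cs : List Char) : Nat := cs.foldl (fun a c => 2 * a + bitOf c) 0

def isBinDigit (c : Char) : Bool := c = '0' || c = '1'

-- hand port of int(s, 2), exact on strings free of whitespace/sign/underscore/'0b'-prefix
-- (the only strings A ever passes to it: slices of a zfilled bin(n)[2:]); none = ValueError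
def parseBin? (cs : List Char) : Option Int :=
  if cs ≠ [] ∧ cs.all isBinDigit then some (binVal cs) else none

-- hand port of hex(v)[2:] (= format(v, 'x')), exact for 0 ≤ v (all uses under Pre_ are nonnegative)
def pyHexLower (v : Int) : String := String.ofList (Nat.toDigits 16 v.toNat)

-- ===== PORT A =====
def split_and_format (p : String) : List String :=
  match PySem.Int.ofStrBase? p 16 with
  | none => []                                   -- int(p,16) raises ValueError: excluded by Pre_
  | some n =>
    -- binstr = bin(int(p,16))[2:].zfill(43)
    let binstr := PySem.Str.zfill (PySem.Str.slice (PySem.Int.pyBin n) (some 2) none) 43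
    let f0 : String := match PySem.Str.pyGet? binstr 0 with   -- binstr[0] (valid)
      | some c => String.ofList [c]
      | none => ""                               -- IndexError: unreachable (binstr has length ≥ 43)
    let f1 := PySem.Str.slice binstr (some 1) (some 31)       -- mpc
    let f2 := PySem.Str.slice binstr (some 31) (some 35)      -- vmask
    let f3 := PySem.Str.slice binstr (some 35) none           -- calldepth
    [f0, f1, f2, f3].map (fun f =>
      match parseBin? f.toList with              -- int(field, 2)
      | some v => pyHexLower v                   -- hex(...)[2:]
      | none => "")                              -- ValueError: excluded by Pre_ (negative n)

-- ===== PORT B =====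
def split_and_format_alt (p : String) : List String :=
  match PySem.Int.ofStrBase? p 16 with
  | none => []                                   -- int(p,16) raises ValueError: excluded by Pre_
  | some n =>
    let valid := n >>> (42 : Nat)
    let mpc := PySem.Int.band (n >>> (12 : Nat)) ((1 <<< 30) - 1)
    let vmask := PySem.Int.band (n >>> (8 : Nat)) 0xF
    let calldepth := PySem.Int.band n 0xFF
    [valid, mpc, vmask, calldepth].map (fun v => pyHexLower v)   -- format(f, 'x')

-- ===== PRECONDITION & SPEC =====
-- Pre_ excludes the inputs on which A raises — strings that are not a valid base-16 literal
-- (ValueError in int(p,16)) and negative hex values (ValueError re-parsing the sign-carrying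
-- binary string) — and, in addition, values of 44 or more bits: those exceed the 43-bit packet
-- format, and on such out-of-format input A lets calldepth absorb the extra bits from the left
-- while B keeps the fixed 1/30/4/8 layout — neither behaviour is specified.
def Pre_split_and_format (p : String) : Prop :=
  0 ≤ (PySem.Int.ofStrBase? p 16).getD (-1) ∧ (PySem.Int.ofStrBase? p 16).getD (-1) < 2 ^ 43
instance (p : String) : Decidable (Pre_split_and_format p) := by unfold Pre_split_and_format; infer_instance
def pvWitness_split_and_format : String := "1a"

def Spec_split_and_format (p : String) (out : List String) : Prop := out = split_and_format_alt p
instance (p : String) (out : List String) : Decidable (Spec_split_and_format p out) := by unfold Spec_split_and_format; infer_instance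

-- ===== CLAIM (what is proved, stated in full; the proofs are below) =====
def Claim_equal_split_and_format : Prop := ∀ (p : String), Dom_split_and_format p → Pre_split_and_format p → Spec_split_and_format p (split_and_format p)

-- ===== LEMMAS AND PROOFS =====

-- foldl of the binary-value step from an arbitrary accumulator
theorem binVal_foldl (cs : List Char) : ∀ (a : Nat),
    cs.foldl (fun a c => 2 * a + bitOf c) a = a * 2 ^ cs.length + binVal cs := by
  induction cs with
  | nil => intro a; simp [binVal]
  | cons c cs ih =>
    intro a
    simp only [List.foldl_cons, List.length_cons, binVal] at *
    rw [ih (2 * a + bitOf c), ih (2 * 0 + bitOf c)]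
    ring

theorem binVal_append (xs ys : List Char) :
    binVal (xs ++ ys) = binVal xs * 2 ^ ys.length + binVal ys := by
  simp only [binVal, List.foldl_append]
  exact binVal_foldl ys _

theorem binVal_lt (cs : List Char) (h : cs.all isBinDigit = true) :
    binVal cs < 2 ^ cs.length := by
  induction cs with
  | nil => simp [binVal]
  | cons c cs ih =>
    simp only [List.all_cons, Bool.and_eq_true] at h
    have h1 : bitOf c ≤ 1 := by unfold bitOf; split <;> omega
    have h2 := ih h.2
    have : binVal (c :: cs) = bitOf c * 2 ^ cs.length + binVal cs := by
      simp only [binVal, List.foldl_cons]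
      simpa using binVal_foldl cs (2 * 0 + bitOf c)
    rw [this, List.length_cons, pow_succ]
    nlinarith

-- characterization of Nat.toDigits 2
theorem toDigitsCore_spec : ∀ (fuel n : Nat) (acc : List Char), n < fuel →
    ∃ pre, Nat.toDigitsCore 2 fuel n acc = pre ++ acc ∧ pre ≠ [] ∧
      pre.all isBinDigit = true ∧ binVal pre = n ∧
      pre.length = max 1 (PySem.Int.bitLength (n : Int)) := by
  intro fuel
  induction fuel with
  | zero => intro n acc h; omega
  | succ f ih =>
    intro n acc h
    rw [Nat.toDigitsCore]
    by_cases h0 : n / 2 = 0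
    · have hn : n = 0 ∨ n = 1 := by omega
      refine ⟨[Nat.digitChar (n % 2)], ?_, by simp, ?_, ?_, ?_⟩
      · simp [h0]
      · rcases hn with rfl | rfl <;> decide
      · rcases hn with rfl | rfl <;> decide
      · rcases hn with rfl | rfl <;> simp <;> decide
    · have hn2 : n / 2 < f := by omega
      obtain ⟨pre, h1, h2, h3, h4, h5⟩ := ih (n / 2) (Nat.digitChar (n % 2) :: acc) hn2
      have hd : isBinDigit (Nat.digitChar (n % 2)) = true ∧ bitOf (Nat.digitChar (n % 2)) = n % 2 := by
        rcases Nat.mod_two_eq_zero_or_one n with h | h <;> rw [h] <;> exact ⟨by decide, by decide⟩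
      refine ⟨pre ++ [Nat.digitChar (n % 2)], ?_, by simp, ?_, ?_, ?_⟩
      · rw [if_neg h0, h1]; simp
      · simp [List.all_append, h3, hd.1]
      · have := binVal_append pre [Nat.digitChar (n % 2)]
        have hb1 : binVal [Nat.digitChar (n % 2)] = n % 2 := by
          simp only [binVal, List.foldl_cons, List.foldl_nil]
          simpa using hd.2
        rw [this, hb1, h4]
        simp only [List.length_cons, List.length_nil]
        omega
      · have hpos : 0 < n := by omega
        have hbl := PySem.Int.bitLength_natCast (m := n) hpos
        have hbl2 : 1 ≤ PySem.Int.bitLength ((n / 2 : Nat) : Int) := by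
          have : 0 < n / 2 := by omega
          rw [PySem.Int.bitLength_natCast this]; omega
        simp only [List.length_append, List.length_cons, List.length_nil, h5]
        omega

theorem toDigits_two_spec (m : Nat) :
    ∃ ds, Nat.toDigits 2 m = ds ∧ ds ≠ [] ∧ ds.all isBinDigit = true ∧
      binVal ds = m ∧ ds.length = max 1 (PySem.Int.bitLength (m : Int)) := by
  obtain ⟨pre, h1, h2, h3, h4, h5⟩ := toDigitsCore_spec (m + 1) m [] (by omega)
  exact ⟨pre, by simpa [Nat.toDigits] using h1, h2, h3, h4, h5⟩

theorem zfill_bin (cs : List Char) (h : cs.all isBinDigit = true) (hne : cs ≠ []) :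
    PySem.Chars.zfill cs 43 = List.replicate (43 - cs.length) '0' ++ cs := by
  unfold PySem.Chars.zfill
  split_ifs with hle
  · have h43 : 43 - cs.length = 0 := by
      have : (43 : Nat) ≤ cs.length := by exact_mod_cast hle
      omega
    simp [h43]
  · cases cs with
    | nil => exact absurd rfl hne
    | cons c rest =>
      have hc : ¬(c = '+' ∨ c = '-') := by
        have hcb : c = '0' ∨ c = '1' := by
          simp only [List.all_cons, Bool.and_eq_true, isBinDigit, Bool.or_eq_true,
            decide_eq_true_eq] at h
          exact h.1
        rcases hcb with rfl | rfl
        · decide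
        · decide
      simp [hc]

theorem binVal_take (cs : List Char) (k : Nat) (hall : cs.all isBinDigit = true)
    (hk : k ≤ cs.length) :
    binVal (cs.take k) = binVal cs / 2 ^ (cs.length - k) := by
  have hsplit := List.take_append_drop k cs
  have hdropall : (cs.drop k).all isBinDigit = true :=
    List.all_eq_true.mpr fun x hx => List.all_eq_true.mp hall x (List.mem_of_mem_drop hx)
  have hlt := binVal_lt (cs.drop k) hdropall
  have hlen : (cs.drop k).length = cs.length - k := List.length_drop ..
  have key : binVal cs = binVal (cs.take k) * 2 ^ (cs.length - k) + binVal (cs.drop k) := by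
    conv_lhs => rw [← hsplit]
    rw [binVal_append, hlen]
  have hd : 0 < 2 ^ (cs.length - k) := Nat.two_pow_pos _
  rw [key, mul_comm, Nat.mul_add_div hd, Nat.div_eq_of_lt (hlen ▸ hlt)]
  omega

theorem binVal_drop (cs : List Char) (k : Nat) (hall : cs.all isBinDigit = true) :
    binVal (cs.drop k) = binVal cs % 2 ^ (cs.length - k) := by
  have hsplit := List.take_append_drop k cs
  have hdropall : (cs.drop k).all isBinDigit = true :=
    List.all_eq_true.mpr fun x hx => List.all_eq_true.mp hall x (List.mem_of_mem_drop hx)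
  have hlt := binVal_lt (cs.drop k) hdropall
  have hlen : (cs.drop k).length = cs.length - k := List.length_drop ..
  have key : binVal cs = binVal (cs.take k) * 2 ^ (cs.length - k) + binVal (cs.drop k) := by
    conv_lhs => rw [← hsplit]
    rw [binVal_append, hlen]
  rw [key, mul_comm, Nat.mul_add_mod, Nat.mod_eq_of_lt (hlen ▸ hlt)]

theorem binVal_replicate (k : Nat) : binVal (List.replicate k '0') = 0 := by
  induction k with
  | zero => simp [binVal]
  | succ j ih => simpa [binVal, List.replicate_succ, bitOf] using ih

theorem all_take_bin (cs : List Char) (k : Nat) (h : cs.all isBinDigit = true) :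
    (cs.take k).all isBinDigit = true :=
  List.all_eq_true.mpr fun x hx => List.all_eq_true.mp h x (List.mem_of_mem_take hx)

theorem all_drop_bin (cs : List Char) (k : Nat) (h : cs.all isBinDigit = true) :
    (cs.drop k).all isBinDigit = true :=
  List.all_eq_true.mpr fun x hx => List.all_eq_true.mp h x (List.mem_of_mem_drop hx)

-- ===== VERDICT (by name: the statement is the Claim_ definition above) =====
theorem split_and_format_spec : Claim_equal_split_and_format := by
  intro p _ hpre
  unfold Spec_split_and_format
  unfold Pre_split_and_format at hpre
  cases h : PySem.Int.ofStrBase? p 16 with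
  | none => rw [h] at hpre; norm_num [Option.getD] at hpre
  | some n =>
    rw [h] at hpre
    simp only [Option.getD_some] at hpre
    obtain ⟨hpre, hlt⟩ := hpre
    simp only [split_and_format, split_and_format_alt, h]
    lift n to ℕ using hpre with m
    obtain ⟨ds, hds, hne, hall, hval, hlen⟩ := toDigits_two_spec m
    have hb1 : (PySem.Str.slice (PySem.Int.pyBin (m : Int)) (some 2)).toList = ds := by
      rw [PySem.Str.toList_slice, PySem.Int.toList_pyBin]
      show PySem.List.slice _ _ _ = _
      rw [PySem.List.slice_from _ (by norm_num : (0:Int) ≤ 2)]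
      rw [PySem.Int.toBinChars0b, if_neg (by omega : ¬ ((m : Int) < 0)), Int.toNat_natCast, hds,
        show Int.toNat 2 = 2 from rfl]
      rfl
    set sl : List Char := List.replicate (43 - ds.length) '0' ++ ds with hsl
    have hzf : (PySem.Str.zfill (PySem.Str.slice (PySem.Int.pyBin (m : Int)) (some 2)) 43).toList = sl := by
      rw [PySem.Str.toList_zfill, hb1, zfill_bin ds hall hne]
    have hslall : sl.all isBinDigit = true := by
      rw [hsl, List.all_append, Bool.and_eq_true]
      refine ⟨List.all_eq_true.mpr fun x hx => ?_, hall⟩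
      rw [List.eq_of_mem_replicate hx]; decide
    have hslval : binVal sl = m := by
      rw [hsl, binVal_append, binVal_replicate, hval]; ring
    have hmlt : m < 2 ^ 43 := by exact_mod_cast hlt
    have hbl43 : PySem.Int.bitLength (m : Int) ≤ 43 := by
      by_cases hm0 : m = 0
      · subst hm0; simp [PySem.Int.bitLength_zero]
      · have h1 := PySem.Int.two_pow_bitLength_le (m : Int) (by exact_mod_cast hm0)
        rw [Int.natAbs_natCast] at h1
        by_contra hc
        have : 2 ^ 43 ≤ 2 ^ (PySem.Int.bitLength (m : Int) - 1) :=
          Nat.pow_le_pow_right (by norm_num) (by omega)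
        omega
    have hLlen : sl.length = 43 := by
      rw [hsl]; simp only [List.length_append, List.length_replicate]; omega
    have h43 : 43 ≤ sl.length := by omega
    obtain ⟨c0, rest, hcr⟩ : ∃ c r, sl = c :: r := by
      cases hx : sl with
      | nil => rw [hx] at h43; simp at h43
      | cons a b => exact ⟨a, b, rfl⟩
    have hget : PySem.Str.pyGet? (PySem.Str.zfill (PySem.Str.slice (PySem.Int.pyBin (m : Int)) (some 2)) 43) 0 = some c0 := by
      show PySem.List.pyGet? (PySem.Str.zfill (PySem.Str.slice (PySem.Int.pyBin (m : Int)) (some 2)) 43).toList 0 = some c0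
      rw [hzf, hcr]
      exact PySem.List.pyGet?_zero_cons ..
    have hf1 : (PySem.Str.slice (PySem.Str.zfill (PySem.Str.slice (PySem.Int.pyBin (m : Int)) (some 2)) 43) (some 1) (some 31)).toList = (sl.take 31).drop 1 := by
      rw [PySem.Str.toList_slice, hzf]
      show PySem.List.slice _ _ _ = _
      rw [PySem.List.slice_toNat _ (by norm_num) (by norm_num), List.drop_take]
      norm_num [show Int.toNat 31 = 31 from rfl, show Int.toNat 35 = 35 from rfl,
        show Int.toNat 1 = 1 from rfl]
    have hf2 : (PySem.Str.slice (PySem.Str.zfill (PySem.Str.slice (PySem.Int.pyBin (m : Int)) (some 2)) 43) (some 31) (some 35)).toList = (sl.take 35).drop 31 := by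
      rw [PySem.Str.toList_slice, hzf]
      show PySem.List.slice _ _ _ = _
      rw [PySem.List.slice_toNat _ (by norm_num) (by norm_num), List.drop_take]
      norm_num [show Int.toNat 31 = 31 from rfl, show Int.toNat 35 = 35 from rfl,
        show Int.toNat 1 = 1 from rfl]
    have hf3 : (PySem.Str.slice (PySem.Str.zfill (PySem.Str.slice (PySem.Int.pyBin (m : Int)) (some 2)) 43) (some 35)).toList = sl.drop 35 := by
      rw [PySem.Str.toList_slice, hzf]
      show PySem.List.slice _ _ _ = _
      rw [PySem.List.slice_from _ (by norm_num : (0:Int) ≤ 35)]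
      norm_num [show Int.toNat 31 = 31 from rfl, show Int.toNat 35 = 35 from rfl,
        show Int.toNat 1 = 1 from rfl]
    have hp0 : parseBin? [c0] = some ((binVal [c0] : Nat) : Int) := by
      rw [parseBin?, if_pos]
      refine ⟨by simp, ?_⟩
      have hx := hslall
      rw [hcr, List.all_cons, Bool.and_eq_true] at hx
      simp [hx.1]
    have hlen1 : ((sl.take 31).drop 1).length = 30 := by
      simp only [List.length_drop, List.length_take]; omega
    have hlen2 : ((sl.take 35).drop 31).length = 4 := by
      simp only [List.length_drop, List.length_take]; omega
    have hlen3 : 8 ≤ (sl.drop 35).length := by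
      simp only [List.length_drop]; omega
    have hp1 : parseBin? ((sl.take 31).drop 1) = some ((binVal ((sl.take 31).drop 1) : Nat) : Int) := by
      rw [parseBin?, if_pos]
      exact ⟨by intro hx; rw [hx] at hlen1; simp at hlen1,
        all_drop_bin _ _ (all_take_bin _ _ hslall)⟩
    have hp2 : parseBin? ((sl.take 35).drop 31) = some ((binVal ((sl.take 35).drop 31) : Nat) : Int) := by
      rw [parseBin?, if_pos]
      exact ⟨by intro hx; rw [hx] at hlen2; simp at hlen2,
        all_drop_bin _ _ (all_take_bin _ _ hslall)⟩
    have hp3 : parseBin? (sl.drop 35) = some ((binVal (sl.drop 35) : Nat) : Int) := by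
      rw [parseBin?, if_pos]
      exact ⟨by intro hx; rw [hx] at hlen3; simp at hlen3,
        all_drop_bin _ _ hslall⟩
    have hv0 : binVal [c0] = m / 2 ^ 42 := by
      have h1 : [c0] = sl.take 1 := by rw [hcr]; simp
      rw [h1, binVal_take sl 1 hslall (by omega), hslval, hLlen]
    have hv1 : binVal ((sl.take 31).drop 1) = m / 2 ^ 12 % 2 ^ 30 := by
      rw [binVal_drop (sl.take 31) 1 (all_take_bin _ _ hslall),
        binVal_take sl 31 hslall (by omega), hslval]
      have h31 : (sl.take 31).length = 31 := by simp only [List.length_take]; omega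
      rw [h31, hLlen]
    have hv2 : binVal ((sl.take 35).drop 31) = m / 2 ^ 8 % 2 ^ 4 := by
      rw [binVal_drop (sl.take 35) 31 (all_take_bin _ _ hslall),
        binVal_take sl 35 hslall (by omega), hslval]
      have h35 : (sl.take 35).length = 35 := by simp only [List.length_take]; omega
      rw [h35, hLlen]
    have hv3 : binVal (sl.drop 35) = m % 2 ^ 8 := by
      rw [binVal_drop sl 35 hslall, hslval, hLlen]
    have e0 : ((binVal [c0] : Nat) : Int) = (m : Int) >>> (42 : Nat) := by
      rw [← Int.natCast_shiftRight, hv0, Nat.shiftRight_eq_div_pow]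
    have e1 : ((binVal ((sl.take 31).drop 1) : Nat) : Int)
        = PySem.Int.band ((m : Int) >>> (12 : Nat)) ((1 <<< 30) - 1) := by
      have hm : ((1 <<< 30 : Int)) - 1 = ((2 ^ 30 - 1 : Nat) : Int) := by decide
      rw [hm, ← Int.natCast_shiftRight, PySem.Int.band_natCast,
        Nat.and_two_pow_sub_one_eq_mod, hv1, Nat.shiftRight_eq_div_pow]
    have e2 : ((binVal ((sl.take 35).drop 31) : Nat) : Int)
        = PySem.Int.band ((m : Int) >>> (8 : Nat)) 15 := by
      have hm : (15 : Int) = ((2 ^ 4 - 1 : Nat) : Int) := by norm_num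
      rw [hm, ← Int.natCast_shiftRight, PySem.Int.band_natCast,
        Nat.and_two_pow_sub_one_eq_mod, hv2, Nat.shiftRight_eq_div_pow]
    have e3 : ((binVal (sl.drop 35) : Nat) : Int) = PySem.Int.band (m : Int) 255 := by
      have hm : (255 : Int) = ((2 ^ 8 - 1 : Nat) : Int) := by norm_num
      rw [hm, PySem.Int.band_natCast, Nat.and_two_pow_sub_one_eq_mod, hv3]
    simp only [List.map_cons, List.map_nil, hget, hf1, hf2, hf3, String.toList_ofList,
      hp0, hp1, hp2, hp3, e0, e1, e2, e3]
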